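-- pv_equiv track=rewrite | github.com/isekai-portal/Link-Context-Learning | mllm/dataset/single_image_dataset/goldG.py | groupby_tokens_positive
-- ===== SOURCE A (Python) =====
-- from typing import Any, Callable, Optional, Tuple, List
--
-- def groupby_tokens_positive(target, tokens_positives: List[List[List[int]]]):
--     from collections import defaultdict
--     from itertools import chain
--     ret = defaultdict(list)
--     for idx, (tgt, tokens_positive) in enumerate(zip(target, tokens_positives)):
--         tokens_positive = tuple(map(tuple, tokens_positive))
--         _ = list(chain.from_iterable(tokens_positive))
--         assert _ == sorted(_)
--         ret[tokens_positive].append(idx)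
--     ret = dict(ret)
--     return ret
-- ===== SOURCE B (Python) =====
-- def groupby_tokens_positive(target, tokens_positives):
--     keys = [tuple(map(tuple, tp)) for _, tp in zip(target, tokens_positives)]
--     for k in keys:
--         flat = [x for span in k for x in span]
--         assert flat == sorted(flat)
--     order = list(dict.fromkeys(keys))
--     return {k: [i for i, kk in enumerate(keys) if kk == k] for k in order}
-- ===== Notes on version B (the rewrite author's own statement) =====
-- stated objective: alternative
-- what changed: Replaces the defaultdict single-pass bucketing with a two-phase decomposition: extract the key list, dedup it in first-appearance order with dict.fromkeys, then build each group's index list by an enumerate scan per distinct key.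
import Mathlib
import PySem

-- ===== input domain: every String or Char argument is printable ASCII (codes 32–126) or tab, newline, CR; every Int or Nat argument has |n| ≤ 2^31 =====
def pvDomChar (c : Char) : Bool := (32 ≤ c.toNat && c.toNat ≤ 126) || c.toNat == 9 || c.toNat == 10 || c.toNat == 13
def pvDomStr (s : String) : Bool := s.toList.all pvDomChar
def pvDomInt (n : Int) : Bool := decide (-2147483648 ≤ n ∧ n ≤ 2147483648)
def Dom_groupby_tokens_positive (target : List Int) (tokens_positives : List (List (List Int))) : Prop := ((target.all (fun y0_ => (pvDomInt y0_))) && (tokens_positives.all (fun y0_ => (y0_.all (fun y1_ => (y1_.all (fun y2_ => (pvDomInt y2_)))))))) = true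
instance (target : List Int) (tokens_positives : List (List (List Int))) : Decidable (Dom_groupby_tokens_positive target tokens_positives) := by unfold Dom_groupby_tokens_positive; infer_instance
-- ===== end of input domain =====

-- B replaces A's defaultdict bucketing pass by an ordered dedup of the key list plus a per-key
-- index scan (alternative decomposition, same results including key order).


-- ===== PORT A =====
-- ret is a defaultdict(list); ret[key].append(idx) is Dict.modify key [] (· ++ [idx]).
-- tuple(map(tuple, tokens_positive)) is the identity under the type convention.
-- The 'assert _ == sorted(_)' raises exactly outside Pre_ below; inside Pre_ it is a no-op.
def groupby_tokens_positive (target : List Int) (tokens_positives : List (List (List Int))) : List (List (List Int) × List Int) :=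
  ((PySem.List.enumerate (List.zip target tokens_positives)).foldl
    (fun (d : PySem.Dict (List (List Int)) (List Int)) p =>
      d.modify p.2.2 [] (fun v => v ++ [p.1]))
    PySem.Dict.empty).items

-- ===== PORT B =====
-- keys = [tp for _, tp in zip(...)]; order = list(dict.fromkeys(keys));
-- {k: [i for i, kk in enumerate(keys) if kk == k] for k in order}
def groupby_tokens_positive_alt (target : List Int) (tokens_positives : List (List (List Int))) : List (List (List Int) × List Int) :=
  let keys := (List.zip target tokens_positives).map (fun p => p.2)
  (PySem.List.dedup keys).map (fun k =>
    (k, (PySem.List.enumerate keys).filterMap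
          (fun q => if q.2 == k then some q.1 else none)))

-- ===== PRECONDITION & SPEC =====
-- Pre_ excludes exactly the inputs on which A's 'assert _ == sorted(_)' raises AssertionError:
-- some tokens_positive paired with a target element has a non-nondecreasing flattening.
def Pre_groupby_tokens_positive (target : List Int) (tokens_positives : List (List (List Int))) : Prop :=
  ∀ tp ∈ tokens_positives.take target.length, List.Pairwise (· ≤ ·) tp.flatten
instance (target : List Int) (tokens_positives : List (List (List Int))) : Decidable (Pre_groupby_tokens_positive target tokens_positives) := by unfold Pre_groupby_tokens_positive; infer_instance
def pvWitness_groupby_tokens_positive : List Int × List (List (List Int)) :=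
  ([7, 8, 9], [[[0, 1]], [[2], [3, 5]], [[0, 1]]])
def Spec_groupby_tokens_positive (target : List Int) (tokens_positives : List (List (List Int))) (out : List (List (List Int) × List Int)) : Prop := out = groupby_tokens_positive_alt target tokens_positives
instance (target : List Int) (tokens_positives : List (List (List Int))) (out : List (List (List Int) × List Int)) : Decidable (Spec_groupby_tokens_positive target tokens_positives out) := by unfold Spec_groupby_tokens_positive; infer_instance

-- ===== CLAIM (what is proved, stated in full; the proofs are below) =====
def Claim_equal_groupby_tokens_positive : Prop := ∀ (target : List Int) (tokens_positives : List (List (List Int))), Dom_groupby_tokens_positive target tokens_positives → Pre_groupby_tokens_positive target tokens_positives → Spec_groupby_tokens_positive target tokens_positives (groupby_tokens_positive target tokens_positives)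

-- ===== LEMMAS AND PROOFS =====

theorem pv_enumerate_map {α β : Type} (f : α → β) (xs : List α) (s : Int) :
    PySem.List.enumerate (xs.map f) s = (PySem.List.enumerate xs s).map (fun p => (p.1, f p.2)) := by
  induction xs generalizing s with
  | nil => simp [PySem.List.enumerate_nil]
  | cons x xs ih => simp [PySem.List.enumerate_cons, ih]

theorem pv_filter_map_eq_filterMap (e : List (Int × Int × List (List Int))) (k : List (List Int)) :
    ((e.map (fun p => (p.2.2, p.1))).filter (fun p => p.1 == k)).map (fun x => x.2)
      = (e.map (fun p => (p.1, p.2.2))).filterMap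
          (fun q => if q.2 == k then some q.1 else none) := by
  induction e with
  | nil => simp
  | cons x e ih =>
    by_cases h : x.2.2 = k <;> simp [h, ih]

theorem pv_ports_eq (target : List Int) (tokens_positives : List (List (List Int))) :
    groupby_tokens_positive target tokens_positives
      = groupby_tokens_positive_alt target tokens_positives := by
  unfold groupby_tokens_positive groupby_tokens_positive_alt
  set z := List.zip target tokens_positives with hz
  set e := PySem.List.enumerate z with he
  -- rewrite A's fold to the canonical (key, value)-pair shape
  have hfold :
      e.foldl (fun (d : PySem.Dict (List (List Int)) (List Int)) p =>
          d.modify p.2.2 [] (fun v => v ++ [p.1])) PySem.Dict.empty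
        = (e.map (fun p => (p.2.2, p.1))).foldl
            (fun (d : PySem.Dict (List (List Int)) (List Int)) q =>
              d.modify q.1 [] (fun v => v ++ [q.2])) PySem.Dict.empty := by
    rw [List.foldl_map]
  rw [hfold]
  set l := e.map (fun p => (p.2.2, p.1)) with hl
  set D := l.foldl (fun (d : PySem.Dict (List (List Int)) (List Int)) q =>
              d.modify q.1 [] (fun v => v ++ [q.2])) PySem.Dict.empty with hD
  have hnodup : D.keys.Nodup := by
    rw [hD]
    exact PySem.Dict.nodup_keys_foldl_modify_key l (fun q => q.1) [] (fun d q v => v ++ [q.2])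
      PySem.Dict.empty (by simp)
  have hmapsnd : e.map (fun p => p.2.2) = z.map (fun p => p.2) := by
    have : e.map (fun p => p.2.2) = (e.map (fun p => p.2)).map (fun x => x.2) := by
      simp [List.map_map]
    rw [this, he, PySem.List.map_snd_enumerate]
  have hkeys : D.keys = PySem.List.dedup (z.map (fun p => p.2)) := by
    rw [hD, PySem.Dict.keys_foldl_modify_key, hl, List.map_map]
    simp only [PySem.List.dedup_eq_ofList]
    exact congrArg _ hmapsnd
  rw [PySem.Dict.items_eq_map_keys D hnodup [], hkeys]
  refine List.map_congr_left (fun k _ => ?_)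
  refine Prod.ext rfl ?_
  show D.getD k [] = _
  rw [hD, hl, PySem.Dict.getD_foldl_modify_append]
  simp only [PySem.Dict.getD_empty, List.nil_append]
  rw [pv_enumerate_map]
  exact pv_filter_map_eq_filterMap e k

-- ===== VERDICT (by name: the statement is the Claim_ definition above) =====
theorem groupby_tokens_positive_spec : Claim_equal_groupby_tokens_positive := by
  intro target tps _ _
  show _ = _
  exact pv_ports_eq target tps
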